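-- pv_equiv track=rewrite | github.com/IndraBr16/EvolutionaryAlgorithms | sudoku_ea.py | consistency
-- ===== SOURCE A (Python) =====
-- def consistency(sudoku_grid):
--     """
--     Function will check how many different elements there are in each row. Ideally there should be 9 different elements,
--     if there are no duplicates. This function can also be used for columns by applying the built-in zip() function
--     as such: zip(*sudoku_grid).
--     :param sudoku_grid: Check how many different elements there are in each row. Ideally there should be 9 different
--     elements, if there are no duplicates.
--     :return: Returns an integer value for the number of conflicts
--     """
--     conflict_score = 0
--     visited = []
--
--     # Iterate through every cell in every row in a 9x9 Sudoku grid.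
--     for row in sudoku_grid:
--         for i in range(len(row)):
--             # If cell value has not been visited, append its index into the visited list.
--             if row[i] not in visited:
--                 visited.append(row[i])
--             else:
--                 conflict_score += 1
--         visited = []
--
--     return conflict_score
-- ===== SOURCE B (Python) =====
-- def consistency(sudoku_grid):
--     return sum(len(row) - len(set(row)) for row in sudoku_grid)
-- ===== Notes on version B (the rewrite author's own statement) =====
-- stated objective: faster
-- what changed: Replaces the per-cell membership scan of an incrementally-built visited list by a per-row cardinality difference len(row) - len(set(row)), summed over rows; the inner branch disappears and each row is processed in linear time.
import Mathlib
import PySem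

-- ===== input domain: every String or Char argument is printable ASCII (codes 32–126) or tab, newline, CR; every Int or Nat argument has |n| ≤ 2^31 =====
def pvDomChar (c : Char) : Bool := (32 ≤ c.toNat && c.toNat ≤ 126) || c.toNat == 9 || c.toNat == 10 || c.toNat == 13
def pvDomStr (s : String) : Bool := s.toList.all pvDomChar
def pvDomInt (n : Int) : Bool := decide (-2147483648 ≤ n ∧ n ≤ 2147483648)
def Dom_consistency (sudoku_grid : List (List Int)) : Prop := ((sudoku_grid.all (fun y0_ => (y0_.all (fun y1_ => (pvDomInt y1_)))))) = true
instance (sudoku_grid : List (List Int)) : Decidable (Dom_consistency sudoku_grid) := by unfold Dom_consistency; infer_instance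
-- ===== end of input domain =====

-- B replaces A's incremental visited-list duplicate detection by summing len(row) - len(set(row)) per row (simpler decomposition; same result).


-- ===== PORT A =====
-- literal transliteration: state (conflict_score, visited); inner loop over range(len(row)) reading row[i]; visited reset after each row
def consistency (sudoku_grid : List (List Int)) : Int :=
  (sudoku_grid.foldl
    (fun st row =>
      let st2 := (PySem.List.pyRange 0 (row.length : Int) 1).foldl
        (fun (st : Int × List Int) i =>
          if (PySem.List.pyGetD row i 0) ∈ st.2 then (st.1 + 1, st.2)
          else (st.1, st.2 ++ [PySem.List.pyGetD row i 0]))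
        st
      (st2.1, ([] : List Int)))
    (0, ([] : List Int))).1

-- ===== PORT B =====
def consistency_alt (sudoku_grid : List (List Int)) : Int :=
  (sudoku_grid.map (fun row => (row.length : Int) - ((PySem.Set.ofList row).length : Int))).sum

-- ===== PRECONDITION & SPEC =====
def Spec_consistency (sudoku_grid : List (List Int)) (out : Int) : Prop := out = consistency_alt sudoku_grid
instance (sudoku_grid : List (List Int)) (out : Int) : Decidable (Spec_consistency sudoku_grid out) := by unfold Spec_consistency; infer_instance

-- ===== CLAIM (what is proved, stated in full; the proofs are below) =====
def Claim_equal_consistency : Prop := ∀ (sudoku_grid : List (List Int)), Dom_consistency sudoku_grid → Spec_consistency sudoku_grid (consistency sudoku_grid)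

-- ===== LEMMAS AND PROOFS =====

-- the inner per-row loop counts repeated cells: score grows by |row| minus the number of values of row not yet in visited
theorem inner_fst (xs : List Int) (s : Int) (v : List Int) :
    (xs.foldl (fun (st : Int × List Int) x =>
        if x ∈ st.2 then (st.1 + 1, st.2) else (st.1, st.2 ++ [x])) (s, v)).1
      = s + (xs.length : Int) - ((xs.toFinset \ v.toFinset).card : Int) := by
  induction xs generalizing s v with
  | nil => simp
  | cons x xs ih =>
    by_cases hx : x ∈ v
    · have hsd : (insert x xs.toFinset) \ v.toFinset = xs.toFinset \ v.toFinset :=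
        Finset.insert_sdiff_of_mem _ (List.mem_toFinset.2 hx)
      simp only [List.foldl_cons, if_pos hx, ih, List.toFinset_cons, hsd, List.length_cons]
      push_cast; ring
    · have hxv : x ∉ v.toFinset := by simpa using hx
      have h1 : (insert x xs.toFinset) \ v.toFinset = insert x (xs.toFinset \ v.toFinset) := by
        ext a; by_cases ha : a = x <;> simp [ha, hxv]
      have h2 : xs.toFinset \ (v.toFinset ∪ {x}) = (xs.toFinset \ v.toFinset).erase x := by
        rw [show v.toFinset ∪ {x} = insert x v.toFinset by
              rw [Finset.union_comm, ← Finset.insert_eq]]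
        rw [Finset.sdiff_insert]
      simp only [List.foldl_cons, if_neg hx, ih, List.toFinset_append, List.toFinset_cons,
        List.toFinset_nil, insert_empty_eq]
      rw [h2, h1, List.length_cons]
      by_cases hxx : x ∈ xs.toFinset \ v.toFinset
      · rw [Finset.insert_eq_self.2 hxx, Finset.card_erase_of_mem hxx]
        have hc : 1 ≤ (xs.toFinset \ v.toFinset).card := Finset.card_pos.2 ⟨x, hxx⟩
        push_cast [Nat.cast_sub hc]; ring
      · rw [Finset.card_insert_of_notMem hxx, Finset.erase_eq_of_notMem hxx]
        push_cast; ring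

-- set(row) has one element per distinct value of row
theorem ofList_length (xs : List Int) : (PySem.Set.ofList xs).length = xs.toFinset.card := by
  have hnd : (PySem.Set.ofList xs).Nodup := PySem.Set.nodup_ofList xs
  have hfs : (PySem.Set.ofList xs).toFinset = xs.toFinset := by
    ext a; simp [List.mem_toFinset, PySem.Set.mem_ofList]
  rw [← hfs, List.toFinset_card_of_nodup hnd]

theorem outer_fold (g : List (List Int)) (s : Int) :
    (g.foldl
      (fun st row =>
        let st2 := (PySem.List.pyRange 0 (row.length : Int) 1).foldl
          (fun (st : Int × List Int) i =>
            if (PySem.List.pyGetD row i 0) ∈ st.2 then (st.1 + 1, st.2)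
            else (st.1, st.2 ++ [PySem.List.pyGetD row i 0]))
          st
        (st2.1, ([] : List Int)))
      (s, ([] : List Int))).1
    = s + (g.map (fun row => (row.length : Int) - ((PySem.Set.ofList row).length : Int))).sum := by
  induction g generalizing s with
  | nil => simp
  | cons row g ih =>
    simp only [List.foldl_cons, List.map_cons, List.sum_cons]
    have hr : ((PySem.List.pyRange 0 (row.length : Int) 1).foldl
          (fun (st : Int × List Int) i =>
            if (PySem.List.pyGetD row i 0) ∈ st.2 then (st.1 + 1, st.2)
            else (st.1, st.2 ++ [PySem.List.pyGetD row i 0]))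
          (s, ([] : List Int))).1
        = s + (row.length : Int) - (row.toFinset.card : Int) := by
      rw [show ((PySem.List.pyRange 0 (row.length : Int) 1).foldl
          (fun (st : Int × List Int) i =>
            if (PySem.List.pyGetD row i 0) ∈ st.2 then (st.1 + 1, st.2)
            else (st.1, st.2 ++ [PySem.List.pyGetD row i 0]))
          (s, ([] : List Int)))
        = (row.foldl (fun (st : Int × List Int) x =>
            if x ∈ st.2 then (st.1 + 1, st.2) else (st.1, st.2 ++ [x])) (s, ([] : List Int)))
        from by
          simpa using PySem.List.foldl_pyRange_pyGetD (a := (0 : Int)) (xs := row) (d := (0 : Int))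
            (f := fun (st : Int × List Int) x =>
              if x ∈ st.2 then (st.1 + 1, st.2) else (st.1, st.2 ++ [x]))
            (init := (s, ([] : List Int))) (by norm_num)]
      rw [inner_fst]; simp
    simp only [hr, ih, ofList_length]
    ring

-- ===== VERDICT (by name: the statement is the Claim_ definition above) =====
theorem consistency_spec : Claim_equal_consistency := by
  intro g _
  show consistency g = consistency_alt g
  unfold consistency consistency_alt
  simpa using outer_fold g 0
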